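-- pv_equiv track=rewrite | github.com/PacificBiosciences/paraphase | paraphase/haplotype_assembler.py | get_thres
-- ===== SOURCE A (Python) =====
-- import math
--
-- def get_thres(num_reads):
--     """Get thresholds for pruning some noisy links"""
--     min_num = min(num_reads) if num_reads != [] else 0
--     remain = [a for a in num_reads if a != min_num]
--     if remain != []:
--         if min(remain) > 10:
--             return min(5, max(2, math.floor(min(remain) / 25)))
--         if min(remain) > 5:
--             return 1
--     return 0
-- ===== SOURCE B (Python) =====
-- def get_thres(num_reads):
--     """Get thresholds for pruning some noisy links"""
--     distinct = sorted(set(num_reads))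
--     if len(distinct) < 2:
--         return 0
--     second = distinct[1]
--     if second > 10:
--         return min(5, max(2, second // 25))
--     if second > 5:
--         return 1
--     return 0
-- ===== Notes on version B (the rewrite author's own statement) =====
-- stated objective: simpler
-- what changed: Replaces the three passes (min, filter-out-min, min again) by one dedupe-and-sort, then reads the second smallest distinct value by index; the ladder is applied to that value.
import Mathlib
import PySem

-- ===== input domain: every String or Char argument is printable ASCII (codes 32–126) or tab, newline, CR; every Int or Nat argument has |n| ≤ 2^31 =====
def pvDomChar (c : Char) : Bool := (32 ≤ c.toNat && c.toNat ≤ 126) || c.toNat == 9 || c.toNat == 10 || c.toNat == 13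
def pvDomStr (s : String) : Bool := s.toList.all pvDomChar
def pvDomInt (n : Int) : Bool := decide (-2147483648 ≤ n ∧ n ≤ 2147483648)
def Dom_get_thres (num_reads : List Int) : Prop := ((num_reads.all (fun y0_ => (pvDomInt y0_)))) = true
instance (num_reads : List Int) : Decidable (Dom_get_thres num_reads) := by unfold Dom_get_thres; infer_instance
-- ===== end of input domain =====

-- B replaces A's three passes (min, filter-out-min, min of the rest) by one dedupe-and-sort
-- and reads the second smallest distinct value by index (objective: simpler).

-- ===== PORT A =====
-- math.floor(x / 25) on an int x with |x| ≤ 2^31 is exact float arithmetic = floor division; ported as PySem.Int.floordiv.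
def get_thres (num_reads : List Int) : Int :=
  let min_num : Int :=
    if num_reads ≠ [] then (PySem.List.min? num_reads (fun x => x)).getD 0 else 0
  let remain := num_reads.filter (fun a => a != min_num)
  if remain ≠ [] then
    if (PySem.List.min? remain (fun x => x)).getD 0 > 10 then
      min 5 (max 2 (PySem.Int.floordiv ((PySem.List.min? remain (fun x => x)).getD 0) 25))
    else if (PySem.List.min? remain (fun x => x)).getD 0 > 5 then 1
    else 0
  else 0

-- ===== PORT B =====
def get_thres_alt (num_reads : List Int) : Int :=
  let distinct := PySem.List.sorted (PySem.Set.ofList num_reads) (fun x => x) false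
  if distinct.length < 2 then 0
  else
    let second := (PySem.List.pyGet? distinct 1).getD 0
    if second > 10 then min 5 (max 2 (PySem.Int.floordiv second 25))
    else if second > 5 then 1
    else 0

-- ===== PRECONDITION & SPEC =====
def Spec_get_thres (num_reads : List Int) (out : Int) : Prop := out = get_thres_alt num_reads
instance (num_reads : List Int) (out : Int) : Decidable (Spec_get_thres num_reads out) := by unfold Spec_get_thres; infer_instance

-- ===== CLAIM (what is proved, stated in full; the proofs are below) =====
def Claim_equal_get_thres : Prop := ∀ (num_reads : List Int), Dom_get_thres num_reads → Spec_get_thres num_reads (get_thres num_reads)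

-- ===== LEMMAS AND PROOFS =====

theorem get_thres_eq (xs : List Int) : get_thres xs = get_thres_alt xs := by
  by_cases hxs : xs = []
  · subst hxs; rfl
  · obtain ⟨m, hm⟩ : ∃ m, PySem.List.min? xs (fun x => x) = some m := by
      cases h : PySem.List.min? xs (fun x => x) with
      | none => exact absurd ((PySem.List.min?_eq_none_iff xs _).mp h) hxs
      | some m => exact ⟨m, rfl⟩
    have hmemm : m ∈ xs := PySem.List.min?_mem hm
    have hminm : ∀ y ∈ xs, m ≤ y := PySem.List.min?_isMin hm
    have hmems : ∀ y : Int,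
        y ∈ PySem.List.sorted (PySem.Set.ofList xs) (fun x => x) false ↔ y ∈ xs := by
      intro y
      rw [PySem.List.mem_sorted, PySem.Set.mem_ofList]
    have hpw := PySem.List.sorted_ofList_pairwise_lt xs
    rcases hs : PySem.List.sorted (PySem.Set.ofList xs) (fun x => x) false with
      _ | ⟨h0, _ | ⟨t1, rest⟩⟩
    · -- sorted(set(xs)) empty but xs nonempty: impossible
      have := (hmems m).mpr hmemm
      rw [hs] at this
      simp at this
    · -- one distinct value: remain is empty, both sides return 0
      have hall : ∀ y ∈ xs, y = h0 := by
        intro y hy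
        have := (hmems y).mpr hy
        rw [hs] at this
        simpa using this
      have hm0 : m = h0 := hall m hmemm
      have hremain : xs.filter (fun a => a != m) = [] := by
        rw [List.filter_eq_nil_iff]
        intro a ha
        simp [hall a ha, hm0]
      unfold get_thres get_thres_alt
      simp [hxs, hm, hremain, hs]
    · -- at least two distinct values
      rw [hs] at hpw
      rw [List.pairwise_cons] at hpw
      obtain ⟨hh0lt, hpw'⟩ := hpw
      rw [List.pairwise_cons] at hpw'
      obtain ⟨ht1lt, _⟩ := hpw'
      have hmemh0 : h0 ∈ xs := (hmems h0).mp (by rw [hs]; simp)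
      have hmemt1 : t1 ∈ xs := (hmems t1).mp (by rw [hs]; simp)
      have hm0 : m = h0 := by
        refine le_antisymm (hminm h0 hmemh0) ?_
        exact PySem.List.key_head_sorted_le (PySem.Set.ofList xs) (fun x => x) hs m
          ((PySem.Set.mem_ofList xs m).mpr hmemm)
      have ht1ne : t1 ≠ m := by
        rw [hm0]
        exact (hh0lt t1 (by simp)).ne'
      have ht1mem : t1 ∈ xs.filter (fun a => a != m) :=
        List.mem_filter.mpr ⟨hmemt1, by simpa using ht1ne⟩
      have hremne : xs.filter (fun a => a != m) ≠ [] := by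
        intro h
        rw [h] at ht1mem
        simp at ht1mem
      obtain ⟨mr, hmr⟩ : ∃ mr, PySem.List.min? (xs.filter (fun a => a != m)) (fun x => x) = some mr := by
        cases h : PySem.List.min? (xs.filter (fun a => a != m)) (fun x => x) with
        | none => exact absurd ((PySem.List.min?_eq_none_iff _ _).mp h) hremne
        | some mr => exact ⟨mr, rfl⟩
      have hmrt1 : mr = t1 := by
        refine le_antisymm (PySem.List.min?_isMin hmr t1 ht1mem) ?_
        have hmrmem := PySem.List.min?_mem hmr
        rw [List.mem_filter] at hmrmem
        obtain ⟨hmrxs, hmrne⟩ := hmrmem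
        have hmrne' : mr ≠ m := by simpa using hmrne
        have hmrs : mr ∈ (h0 :: t1 :: rest) := by rw [← hs]; exact (hmems mr).mpr hmrxs
        simp only [List.mem_cons] at hmrs
        rcases hmrs with rfl | rfl | hmrs
        · exact absurd hm0.symm hmrne'
        · exact le_rfl
        · exact (ht1lt mr hmrs).le
      unfold get_thres get_thres_alt
      simp only [hs, hxs, ne_eq, not_false_iff, if_true, hm, Option.getD_some, hremne, hmr, hmrt1]
      simp [PySem.List.pyGet?, PySem.List.pyIdx?]

-- ===== VERDICT (by name: the statement is the Claim_ definition above) =====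
theorem get_thres_spec : Claim_equal_get_thres := by
  intro xs _
  unfold Spec_get_thres
  exact get_thres_eq xs
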